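-- pv_equiv track=rewrite | github.com/navvyiin/DSA | 3661-maximum-walls-destroyed-by-robots/3661-maximum-walls-destroyed-by-robots.py | maxWalls
-- ===== SOURCE A (Python) =====
-- def maxWalls(robots, distance, walls):
--     import bisect
--
--     # Sort robots with distances
--     robots_with_d = sorted(zip(robots, distance))
--     robots = [r for r, _ in robots_with_d]
--     distance = [d for _, d in robots_with_d]
--     walls.sort()
--
--     n = len(robots)
--     m = len(walls)
--
--     # Precompute intervals
--     left_intervals = []
--     right_intervals = []
--
--     for i in range(n):
--         # left interval
--         left_limit = robots[i] - distance[i]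
--         left_block = robots[i-1] if i > 0 else -10**18
--         l = max(left_limit, left_block)
--         left_intervals.append((l, robots[i]))
--
--         # right interval
--         right_limit = robots[i] + distance[i]
--         right_block = robots[i+1] if i < n-1 else 10**18
--         r = min(right_limit, right_block)
--         right_intervals.append((robots[i], r))
--
--     # DP over robots, tracking last covered wall index
--     from functools import lru_cache
--
--     @lru_cache(None)
--     def dp(i, last_idx):
--         if i == n:
--             return 0
--
--         res = 0
--
--         # Try left
--         l, r = left_intervals[i]
--         li = bisect.bisect_left(walls, l)
--         ri = bisect.bisect_right(walls, r)
--
--         gain = 0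
--         new_last = last_idx
--
--         for idx in range(li, ri):
--             if idx > last_idx:
--                 gain += 1
--                 new_last = idx
--
--         res = max(res, gain + dp(i + 1, new_last))
--
--         # Try right
--         l, r = right_intervals[i]
--         li = bisect.bisect_left(walls, l)
--         ri = bisect.bisect_right(walls, r)
--
--         gain = 0
--         new_last = last_idx
--
--         for idx in range(li, ri):
--             if idx > last_idx:
--                 gain += 1
--                 new_last = idx
--
--         res = max(res, gain + dp(i + 1, new_last))
--
--         return res
--
--     return dp(0, -1)
-- ===== SOURCE B (Python) =====
-- def maxWalls(robots, distance, walls):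
--     import bisect
--
--     pairs = sorted(zip(robots, distance))
--     walls = sorted(walls)
--     n = len(pairs)
--
--     # For each robot, the half-open wall-index ranges [li, ri) its left and right
--     # intervals cover, found once with bisect.
--     ranges = []
--     for i in range(n):
--         r, d = pairs[i]
--         l = r - d
--         if i > 0:
--             l = max(l, pairs[i - 1][0])
--         rr = r + d
--         if i < n - 1:
--             rr = min(rr, pairs[i + 1][0])
--         ranges.append(((bisect.bisect_left(walls, l), bisect.bisect_right(walls, r)),
--                        (bisect.bisect_left(walls, r), bisect.bisect_right(walls, rr))))
--
--     # Forward DP over reachable states: cur maps the last destroyed wall index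
--     # to the best number of walls destroyed so far.  Each transition is O(1).
--     cur = {-1: 0}
--     for (l0, r0), (l1, r1) in ranges:
--         new = {}
--         for last, val in cur.items():
--             lo = max(l0, last + 1)
--             if lo < r0:
--                 nl, cand = r0 - 1, val + (r0 - lo)
--             else:
--                 nl, cand = last, val
--             if nl not in new or new[nl] < cand:
--                 new[nl] = cand
--             lo = max(l1, last + 1)
--             if lo < r1:
--                 nl, cand = r1 - 1, val + (r1 - lo)
--             else:
--                 nl, cand = last, val
--             if nl not in new or new[nl] < cand:
--                 new[nl] = cand
--         cur = new
--     return max(cur.values(), default=0)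
-- ===== Notes on version B (the rewrite author's own statement) =====
-- stated objective: faster
-- what changed: B replaces A's memoized recursion, whose gain/new_last inner loop rescans up to m wall indices per visited state, by a forward DP over a dict of reachable (last wall, best count) states with O(1) arithmetic transitions on bisect index ranges precomputed once per robot.
import Mathlib
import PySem

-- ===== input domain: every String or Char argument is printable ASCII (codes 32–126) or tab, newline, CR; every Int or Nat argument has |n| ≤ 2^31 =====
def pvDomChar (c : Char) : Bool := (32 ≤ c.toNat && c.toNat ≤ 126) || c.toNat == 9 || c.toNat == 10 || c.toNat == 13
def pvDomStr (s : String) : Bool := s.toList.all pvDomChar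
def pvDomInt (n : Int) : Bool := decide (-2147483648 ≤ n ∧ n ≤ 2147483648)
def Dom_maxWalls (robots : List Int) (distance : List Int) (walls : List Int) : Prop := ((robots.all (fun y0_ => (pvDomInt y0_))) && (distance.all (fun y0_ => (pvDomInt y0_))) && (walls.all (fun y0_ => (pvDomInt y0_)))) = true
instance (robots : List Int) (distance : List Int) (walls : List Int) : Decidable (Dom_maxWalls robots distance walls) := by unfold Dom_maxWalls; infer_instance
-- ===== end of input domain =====

-- B replaces A's memoized recursion (inner O(m) gain/new_last scan per state) by a forward DP over
-- reachable states with O(1) arithmetic transitions on precomputed bisect index ranges.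
-- The equivalence is about the RETURN value only: A sorts `walls` in place, B leaves its arguments untouched.

-- ===== PORT A =====

-- A's interval precomputation for robot index i (robots/distance already sorted together):
-- left interval (l, robots[i]) and right interval (robots[i], r), with sentinels ±10^18.
def pvIvA (robots distance : List Int) (n : Int) (i : Nat) : (Int × Int) × (Int × Int) :=
  let r := PySem.List.pyGetD robots (i : Int) 0      -- robots[i]; i is always in range here
  let d := PySem.List.pyGetD distance (i : Int) 0
  let leftBlock := if 0 < (i : Int) then PySem.List.pyGetD robots ((i : Int) - 1) 0 else -(10^18)
  let l := max (r - d) leftBlock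
  let rightBlock := if (i : Int) < n - 1 then PySem.List.pyGetD robots ((i : Int) + 1) 0 else 10^18
  let rr := min (r + d) rightBlock
  ((l, r), (r, rr))

-- A's inner loop: `for idx in range(li, ri): if idx > last_idx: gain += 1; new_last = idx`
-- on state (gain, new_last), with li/ri the bisect indices of the interval (l, r).
def pvScanA (walls : List Int) (l r last : Int) : Int × Int :=
  let li : Int := PySem.List.bisectLeft walls l
  let ri : Int := PySem.List.bisectRight walls r
  (PySem.List.pyRange li ri 1).foldl
    (fun s idx => if last < idx then (s.1 + 1, idx) else s) (0, last)

-- A's dp(i, last_idx): structural recursion over the remaining (left, right) interval pairs.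
def pvDpA (walls : List Int) : List ((Int × Int) × (Int × Int)) → Int → Int
  | [], _ => 0
  | (lv, rv) :: rest, last =>
    let s1 := pvScanA walls lv.1 lv.2 last
    let s2 := pvScanA walls rv.1 rv.2 last
    max (max 0 (s1.1 + pvDpA walls rest s1.2)) (s2.1 + pvDpA walls rest s2.2)

def maxWalls (robots : List Int) (distance : List Int) (walls : List Int) : Int :=
  let rwd := PySem.List.sorted2 (List.zip robots distance) (fun p => p.1) (fun p => p.2)
  let robots := rwd.map (fun p => p.1)
  let distance := rwd.map (fun p => p.2)
  let walls := PySem.List.sorted walls (fun x => x)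
  let n := robots.length
  let ivs := (List.range n).map (pvIvA robots distance (n : Int))
  pvDpA walls ivs (-1)

-- ===== PORT B =====

-- B's precomputation: for robot i, the half-open wall-index ranges [li, ri) of its
-- left and right intervals, found by bisect once.
def pvRngB (pairs : List (Int × Int)) (walls : List Int) (i : Nat) : (Int × Int) × (Int × Int) :=
  let p := PySem.List.pyGetD pairs (i : Int) (0, 0)   -- pairs[i]; i is always in range here
  let l := if 0 < i then max (p.1 - p.2) (PySem.List.pyGetD pairs ((i : Int) - 1) (0, 0)).1
           else p.1 - p.2
  let rr := if (i : Int) < (pairs.length : Int) - 1 then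
              min (p.1 + p.2) (PySem.List.pyGetD pairs ((i : Int) + 1) (0, 0)).1
            else p.1 + p.2
  (((PySem.List.bisectLeft walls l : Int), (PySem.List.bisectRight walls p.1 : Int)),
   ((PySem.List.bisectLeft walls p.1 : Int), (PySem.List.bisectRight walls rr : Int)))

-- B's O(1) transition: from state (last, val) through index range rng to (nl, cand)
def pvTrans (rng : Int × Int) (last val : Int) : Int × Int :=
  let lo := max rng.1 (last + 1)
  if lo < rng.2 then (rng.2 - 1, val + (rng.2 - lo)) else (last, val)

-- `if nl not in new or new[nl] < cand: new[nl] = cand`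
def pvUpd (d : PySem.Dict Int Int) (t : Int × Int) : PySem.Dict Int Int :=
  if d.contains t.1 = false then d.insert t.1 t.2
  else if d.getD t.1 0 < t.2 then d.insert t.1 t.2 else d

-- one robot layer of B's forward DP: fold the two transitions of every current state into a new dict
def pvStep (rg : (Int × Int) × (Int × Int)) (cur : PySem.Dict Int Int) : PySem.Dict Int Int :=
  cur.items.foldl
    (fun new p => pvUpd (pvUpd new (pvTrans rg.1 p.1 p.2)) (pvTrans rg.2 p.1 p.2))
    PySem.Dict.empty

def maxWalls_alt (robots : List Int) (distance : List Int) (walls : List Int) : Int :=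
  let pairs := PySem.List.sorted2 (List.zip robots distance) (fun p => p.1) (fun p => p.2)
  let walls := PySem.List.sorted walls (fun x => x)
  let n := pairs.length
  let ranges := (List.range n).map (pvRngB pairs walls)
  let cur := ranges.foldl (fun cur rg => pvStep rg cur) (PySem.Dict.ofList [(-1, 0)])
  PySem.List.maxD cur.values (fun x => x) 0

-- ===== PRECONDITION & SPEC =====
def Spec_maxWalls (robots : List Int) (distance : List Int) (walls : List Int) (out : Int) : Prop := out = maxWalls_alt robots distance walls
instance (robots : List Int) (distance : List Int) (walls : List Int) (out : Int) : Decidable (Spec_maxWalls robots distance walls out) := by unfold Spec_maxWalls; infer_instance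

-- ===== CLAIM (what is proved, stated in full; the proofs are below) =====
def Claim_equal_maxWalls : Prop := ∀ (robots : List Int) (distance : List Int) (walls : List Int), Dom_maxWalls robots distance walls → Spec_maxWalls robots distance walls (maxWalls robots distance walls)

-- ===== LEMMAS AND PROOFS =====

-- bisecting A's value intervals gives B's index ranges
def pvBis (walls : List Int) (iv : (Int × Int) × (Int × Int)) : (Int × Int) × (Int × Int) :=
  (((PySem.List.bisectLeft walls iv.1.1 : Int), (PySem.List.bisectRight walls iv.1.2 : Int)),
   ((PySem.List.bisectLeft walls iv.2.1 : Int), (PySem.List.bisectRight walls iv.2.2 : Int)))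

-- best A-continuation over a list of (last, val) states
def pvBest (f : Int → Int) (init : Int) (l : List (Int × Int)) : Int :=
  l.foldl (fun a p => max a (p.2 + f p.1)) init

-- A's inner loop in closed form
theorem scan_closed (last : Int) : ∀ (li ri : Int) (acc : Int × Int),
    (PySem.List.pyRange li ri 1).foldl
      (fun s idx => if last < idx then (s.1 + 1, idx) else s) acc
    = (acc.1 + max 0 (ri - max li (last + 1)),
       if max li (last + 1) < ri then ri - 1 else acc.2) := by
  intro li ri
  by_cases hlt : li < ri
  · induction hn : (ri - li).toNat generalizing li with
    | zero => omega
    | succ k ih =>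
      intro acc
      rw [PySem.List.pyRange_one_cons hlt, List.foldl_cons]
      by_cases hk : li + 1 < ri
      · rw [ih (li + 1) hk (by omega)]
        by_cases hl : last < li
        · simp only [if_pos hl, Prod.mk.injEq]
          refine ⟨by omega, ?_⟩
          split_ifs <;> omega
        · simp only [if_neg hl, Prod.mk.injEq]
          refine ⟨by omega, ?_⟩
          split_ifs <;> omega
      · have hnil : PySem.List.pyRange (li + 1) ri 1 = [] :=
          PySem.List.pyRange_one_eq_nil (by omega)
        rw [hnil, List.foldl_nil]
        by_cases hl : last < li
        · simp only [if_pos hl, Prod.mk.injEq]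
          refine ⟨by omega, ?_⟩
          split_ifs <;> omega
        · simp only [if_neg hl]
          exact Prod.ext (by omega) (by rw [if_neg (by omega)])
  · intro acc
    rw [PySem.List.pyRange_one_eq_nil (by omega), List.foldl_nil]
    exact Prod.ext (by omega) (by rw [if_neg (by omega)])

theorem scanA_eq (walls : List Int) (l r last : Int) :
    pvScanA walls l r last
    = (max 0 ((PySem.List.bisectRight walls r : Int) - max ((PySem.List.bisectLeft walls l : Nat) : Int) (last + 1)),
       if max ((PySem.List.bisectLeft walls l : Nat) : Int) (last + 1) < (PySem.List.bisectRight walls r : Int)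
       then (PySem.List.bisectRight walls r : Int) - 1 else last) := by
  unfold pvScanA
  rw [scan_closed]
  simp only [zero_add]

theorem dpA_nonneg (walls : List Int) (ivs : List ((Int × Int) × (Int × Int))) (last : Int) :
    0 ≤ pvDpA walls ivs last := by
  cases ivs with
  | nil => exact le_refl 0
  | cons hd tl =>
    exact le_trans (le_max_left 0 _) (le_max_left _ _)

-- one A-step of value+continuation equals the best of B's two O(1) transitions
theorem point (walls : List Int) (iv : (Int × Int) × (Int × Int))
    (rest : List ((Int × Int) × (Int × Int))) (last val : Int) (_hval : 0 ≤ val) :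
    val + pvDpA walls (iv :: rest) last
    = max ((pvTrans (pvBis walls iv).1 last val).2 + pvDpA walls rest (pvTrans (pvBis walls iv).1 last val).1)
          ((pvTrans (pvBis walls iv).2 last val).2 + pvDpA walls rest (pvTrans (pvBis walls iv).2 last val).1) := by
  obtain ⟨lv, rv⟩ := iv
  have h1 := dpA_nonneg walls rest ((PySem.List.bisectRight walls lv.2 : Int) - 1)
  have h2 := dpA_nonneg walls rest ((PySem.List.bisectRight walls rv.2 : Int) - 1)
  have h3 := dpA_nonneg walls rest last
  simp only [pvDpA, scanA_eq, pvTrans, pvBis]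
  split_ifs <;> simp only [] <;> omega

-- initial accumulator exchange for pvBest
theorem pvBest_max_init (f : Int → Int) :
    ∀ (l : List (Int × Int)) (x y : Int), pvBest f (max x y) l = max x (pvBest f y l) := by
  intro l
  induction l with
  | nil => intro x y; rfl
  | cons p t ih =>
    intro x y
    show pvBest f (max (max x y) (p.2 + f p.1)) t = max x (pvBest f (max y (p.2 + f p.1)) t)
    rw [max_assoc, ih]

-- overwriting the (unique) entry at key k with a larger value
theorem pvBest_overwrite (f : Int → Int) (k w c : Int) (hwc : w ≤ c) :
    ∀ (l : List (Int × Int)) (i : Int), (k, w) ∈ l → (l.map Prod.fst).Nodup →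
    pvBest f i (l.map (fun p => if (p.1 == k) = true then (k, c) else p))
      = max (pvBest f i l) (c + f k) := by
  intro l
  induction l with
  | nil => intro i hm; exact absurd hm (List.not_mem_nil)
  | cons p t ih =>
    intro i hm hnd
    rw [List.map_cons] at hnd
    by_cases hpk : p.1 = k
    · have hknt : k ∉ t.map Prod.fst := by
        rw [← hpk]; exact (List.nodup_cons.mp hnd).1
      have hpt : p = (k, w) := by
        rcases List.mem_cons.mp hm with h | h
        · exact h.symm
        · exact absurd (List.mem_map.mpr ⟨(k, w), h, rfl⟩) hknt
      have hid : t.map (fun p => if (p.1 == k) = true then (k, c) else p) = t := by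
        have hq : ∀ q ∈ t, (if (q.1 == k) = true then (k, c) else q) = q := by
          intro q hq
          rw [if_neg]
          simp only [beq_iff_eq]
          intro hqk
          exact hknt (List.mem_map.mpr ⟨q, hq, hqk⟩)
        rw [List.map_congr_left hq, List.map_id']
      subst hpt
      rw [List.map_cons, hid, if_pos (by simp)]
      show pvBest f (max i (c + f k)) t = max (pvBest f (max i (w + f k)) t) (c + f k)
      rw [max_comm i (c + f k), pvBest_max_init, max_comm i (w + f k), pvBest_max_init]
      have := le_max_right (w + f k) (pvBest f i t)
      omega
    · have hmt : (k, w) ∈ t := by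
        rcases List.mem_cons.mp hm with h | h
        · exact absurd (congrArg Prod.fst h.symm) hpk
        · exact h
      rw [List.map_cons, if_neg (by simpa using hpk)]
      show pvBest f (max i (p.2 + f p.1)) (t.map _) = max (pvBest f (max i (p.2 + f p.1)) t) (c + f k)
      exact ih _ hmt (List.nodup_cons.mp hnd).2

-- pvUpd keeps exactly the per-key maximum, so the best over items absorbs the new candidate
theorem pvBest_upd (f : Int → Int) (i : Int) (d : PySem.Dict Int Int) (t : Int × Int)
    (hnd : d.keys.Nodup) :
    pvBest f i (pvUpd d t).items = max (pvBest f i d.items) (t.2 + f t.1) := by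
  obtain ⟨k, c⟩ := t
  unfold pvUpd
  by_cases hc : d.contains k = false
  · rw [if_pos hc, PySem.Dict.items_insert_of_not_contains d _ hc]
    unfold pvBest
    rw [List.foldl_append]
    rfl
  · rw [if_neg hc]
    have hsome : (d.get? k).isSome := by
      rw [← PySem.Dict.contains_eq_isSome_get?]
      exact Bool.of_not_eq_false hc
    obtain ⟨w, hw⟩ := Option.isSome_iff_exists.mp hsome
    have hgd : d.getD k 0 = w := PySem.Dict.getD_of_get?_eq_some d 0 hw
    have hmem : (k, w) ∈ d.items := PySem.Dict.mem_items_of_get?_eq_some d hw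
    by_cases hlt : d.getD k 0 < c
    · rw [if_pos hlt, PySem.Dict.items_insert_of_contains d _ (Bool.of_not_eq_false hc)]
      exact pvBest_overwrite f k w c (by omega) d.items i hmem hnd
    · rw [if_neg hlt]
      have hle : w + f k ≤ pvBest f i d.items :=
        (PySem.List.le_foldl_max_int d.items (fun p => p.2 + f p.1) i).2 (k, w) hmem
      have : c + f k ≤ pvBest f i d.items := by omega
      exact (max_eq_left this).symm

theorem upd_nodup (d : PySem.Dict Int Int) (t : Int × Int) (h : d.keys.Nodup) :
    (pvUpd d t).keys.Nodup := by
  unfold pvUpd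
  split_ifs <;> first | exact PySem.Dict.nodup_keys_insert _ _ _ h | exact h

theorem upd_val (d : PySem.Dict Int Int) (t : Int × Int)
    (hd : ∀ p ∈ d.items, (0 : Int) ≤ p.2) (ht : 0 ≤ t.2) :
    ∀ p ∈ (pvUpd d t).items, (0 : Int) ≤ p.2 := by
  unfold pvUpd
  split_ifs <;> intro p hp
  · rcases (PySem.Dict.mem_items_insert _ _ _ _).mp hp with h | ⟨h, _⟩
    · rw [h]; exact ht
    · exact hd p h
  · rcases (PySem.Dict.mem_items_insert _ _ _ _).mp hp with h | ⟨h, _⟩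
    · rw [h]; exact ht
    · exact hd p h
  · exact hd p hp

theorem trans_val (rng : Int × Int) (last val : Int) (h : 0 ≤ val) :
    0 ≤ (pvTrans rng last val).2 := by
  simp only [pvTrans]
  split_ifs with hc
  · simp only []
    omega
  · exact h

-- the inner fold of a layer: best over the built dict = running max over all candidates
theorem inner (f : Int → Int) (rg : (Int × Int) × (Int × Int)) :
    ∀ (l : List (Int × Int)) (d : PySem.Dict Int Int), d.keys.Nodup →
    pvBest f 0 ((l.foldl (fun new p => pvUpd (pvUpd new (pvTrans rg.1 p.1 p.2)) (pvTrans rg.2 p.1 p.2)) d).items)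
    = l.foldl (fun a p => max a (max
        ((pvTrans rg.1 p.1 p.2).2 + f (pvTrans rg.1 p.1 p.2).1)
        ((pvTrans rg.2 p.1 p.2).2 + f (pvTrans rg.2 p.1 p.2).1)))
      (pvBest f 0 d.items) := by
  intro l
  induction l with
  | nil => intro d _; rfl
  | cons p t ih =>
    intro d hnd
    rw [List.foldl_cons, List.foldl_cons,
      ih _ (upd_nodup _ _ (upd_nodup _ _ hnd)),
      pvBest_upd _ _ _ _ (upd_nodup _ _ hnd), pvBest_upd _ _ _ _ hnd, max_assoc]

theorem step_nodup (rg : (Int × Int) × (Int × Int)) :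
    ∀ (l : List (Int × Int)) (d : PySem.Dict Int Int), d.keys.Nodup →
    ((l.foldl (fun new p => pvUpd (pvUpd new (pvTrans rg.1 p.1 p.2)) (pvTrans rg.2 p.1 p.2)) d)).keys.Nodup := by
  intro l
  induction l with
  | nil => intro d h; exact h
  | cons p t ih => intro d h; exact ih _ (upd_nodup _ _ (upd_nodup _ _ h))

theorem step_val (rg : (Int × Int) × (Int × Int)) :
    ∀ (l : List (Int × Int)) (d : PySem.Dict Int Int),
    (∀ p ∈ l, (0 : Int) ≤ p.2) → (∀ q ∈ d.items, (0 : Int) ≤ q.2) →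
    ∀ q ∈ ((l.foldl (fun new p => pvUpd (pvUpd new (pvTrans rg.1 p.1 p.2)) (pvTrans rg.2 p.1 p.2)) d)).items,
      (0 : Int) ≤ q.2 := by
  intro l
  induction l with
  | nil => intro d _ hd; exact hd
  | cons p t ih =>
    intro d hl hd
    refine ih _ (fun q hq => hl q (List.mem_cons_of_mem _ hq)) ?_
    have hp := hl p List.mem_cons_self
    exact upd_val _ _ (upd_val _ _ hd (trans_val _ _ _ hp)) (trans_val _ _ _ hp)

-- one layer: the best continuation through B's new dict is the best continuation from the old one
theorem layer (walls : List Int) (iv : (Int × Int) × (Int × Int))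
    (rest : List ((Int × Int) × (Int × Int))) (D : PySem.Dict Int Int)
    (hv : ∀ p ∈ D.items, (0 : Int) ≤ p.2) :
    pvBest (fun k => pvDpA walls rest k) 0 ((pvStep (pvBis walls iv) D).items)
    = pvBest (fun k => pvDpA walls (iv :: rest) k) 0 D.items := by
  unfold pvStep
  rw [inner _ _ _ _ PySem.Dict.nodup_keys_empty]
  show _ = D.items.foldl (fun a p => max a (p.2 + pvDpA walls (iv :: rest) p.1)) 0
  exact PySem.List.foldl_congr_mem _ _ _ _
    (fun acc p hp => by rw [← point walls iv rest p.1 p.2 (hv p hp)])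

-- forward DP over the robots equals the backward dp read through the current states
theorem forward (walls : List Int) :
    ∀ (ivs : List ((Int × Int) × (Int × Int))) (D : PySem.Dict Int Int),
    D.keys.Nodup → (∀ p ∈ D.items, (0 : Int) ≤ p.2) →
    pvBest (fun _ => (0 : Int)) 0 (((ivs.map (pvBis walls)).foldl (fun cur rg => pvStep rg cur) D).items)
    = pvBest (fun k => pvDpA walls ivs k) 0 D.items := by
  intro ivs
  induction ivs with
  | nil => intro D _ _; rfl
  | cons iv rest ih =>
    intro D hnd hv
    have hnd' : (pvStep (pvBis walls iv) D).keys.Nodup := by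
      unfold pvStep; exact step_nodup _ _ _ PySem.Dict.nodup_keys_empty
    have hv' : ∀ p ∈ (pvStep (pvBis walls iv) D).items, (0 : Int) ≤ p.2 := by
      unfold pvStep
      exact step_val _ _ _ hv (fun q hq => absurd hq (by simp [PySem.Dict.empty]))
    rw [List.map_cons, List.foldl_cons, ih (pvStep (pvBis walls iv) D) hnd' hv',
      layer walls iv rest D hv]

-- max(xs, default=0) of a nonnegative list is its left fold with max from 0
theorem maxD_nonneg (xs : List Int) (hx : ∀ x ∈ xs, (0 : Int) ≤ x) :
    PySem.List.maxD xs (fun x => x) 0 = xs.foldl max 0 := by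
  have key2 : ∀ (t : List Int) (a : Int),
      PySem.List.max? (a :: t) (fun y => y) = some (t.foldl max a) := by
    intro t
    induction t with
    | nil => intro a; rfl
    | cons x s ih =>
      intro a
      have e : PySem.List.max? (a :: x :: s) (fun y => y)
          = PySem.List.max? (max a x :: s) (fun y => y) := by
        show List.foldl _ (if a < x then some x else some a) s
          = List.foldl _ (some (max a x)) s
        congr 1
        split_ifs with h
        · rw [max_eq_right (by omega)]
        · rw [max_eq_left (by omega)]
      rw [e, ih (max a x), List.foldl_cons]
  cases xs with
  | nil => rfl
  | cons x t =>
    show (PySem.List.max? (x :: t) (fun y => y)).getD 0 = (x :: t).foldl max 0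
    rw [key2 t x, Option.getD_some, List.foldl_cons,
      max_eq_right (hx x List.mem_cons_self)]

-- assembling B's forward dict DP into A's dp value
theorem final_eq (ws : List Int) (ivs : List ((Int × Int) × (Int × Int))) :
    pvDpA ws ivs (-1)
      = PySem.List.maxD
          (((ivs.map (pvBis ws)).foldl (fun cur rg => pvStep rg cur) (PySem.Dict.ofList [(-1, 0)])).values)
          (fun x => x) 0 := by
  have hnd0 : (PySem.Dict.ofList [((-1 : Int), (0 : Int))]).keys.Nodup :=
    PySem.Dict.nodup_keys_ofList _
  have hv0 : ∀ p ∈ (PySem.Dict.ofList [((-1 : Int), (0 : Int))]).items, (0 : Int) ≤ p.2 := by decide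
  have props : ∀ (rgs : List ((Int × Int) × (Int × Int))) (D : PySem.Dict Int Int),
      D.keys.Nodup → (∀ p ∈ D.items, (0 : Int) ≤ p.2) →
      ∀ p ∈ (rgs.foldl (fun cur rg => pvStep rg cur) D).items, (0 : Int) ≤ p.2 := by
    intro rgs
    induction rgs with
    | nil => intro D _ h2; exact h2
    | cons rg t ih =>
      intro D h1 h2
      refine ih _ ?_ ?_
      · unfold pvStep; exact step_nodup _ _ _ PySem.Dict.nodup_keys_empty
      · unfold pvStep
        exact step_val _ _ _ h2 (fun q hq => absurd hq (by simp [PySem.Dict.empty]))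
  have hvF := props (ivs.map (pvBis ws)) _ hnd0 hv0
  have hvals : ∀ x ∈ ((ivs.map (pvBis ws)).foldl (fun cur rg => pvStep rg cur) (PySem.Dict.ofList [(-1, 0)])).values,
      (0 : Int) ≤ x := by
    intro x hx
    simp only [PySem.Dict.values, List.mem_map] at hx
    obtain ⟨p, hp, hpe⟩ := hx
    exact hpe ▸ hvF p hp
  rw [maxD_nonneg _ hvals,
    show (((ivs.map (pvBis ws)).foldl (fun cur rg => pvStep rg cur) (PySem.Dict.ofList [(-1, 0)])).values)
      = (((ivs.map (pvBis ws)).foldl (fun cur rg => pvStep rg cur) (PySem.Dict.ofList [(-1, 0)])).items).map (fun p => p.2)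
      from by simp [PySem.Dict.values],
    List.foldl_map,
    PySem.List.foldl_congr_mem _ (fun (a : Int) (p : Int × Int) => max a p.2)
      (fun a p => max a (p.2 + (fun _ : Int => (0 : Int)) p.1)) 0
      (fun acc p _ => by show max acc p.2 = max acc (p.2 + 0); rw [add_zero]),
    show (List.foldl (fun (a : Int) (p : Int × Int) => max a (p.2 + (fun _ : Int => (0 : Int)) p.1)) 0
        (((ivs.map (pvBis ws)).foldl (fun cur rg => pvStep rg cur) (PySem.Dict.ofList [(-1, 0)])).items))
      = pvBest (fun _ => (0 : Int)) 0 (((ivs.map (pvBis ws)).foldl (fun cur rg => pvStep rg cur) (PySem.Dict.ofList [(-1, 0)])).items)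
      from rfl,
    forward ws ivs _ hnd0 hv0,
    show (PySem.Dict.ofList [((-1 : Int), (0 : Int))]).items = [(-1, 0)] from rfl]
  show pvDpA ws ivs (-1) = max 0 (0 + pvDpA ws ivs (-1))
  rw [zero_add, max_eq_right (dpA_nonneg _ _ _)]

-- indexing a projected pair list
theorem getD_map_fst (pairs : List (Int × Int)) (k : Nat) (hk : k < pairs.length) :
    PySem.List.pyGetD (pairs.map (fun p => p.1)) (k : Int) 0
      = (PySem.List.pyGetD pairs (k : Int) ((0 : Int), (0 : Int))).1 := by
  rw [PySem.List.pyGetD_eq_getElem _ _ (by omega) (by simpa using by exact_mod_cast hk),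
    PySem.List.pyGetD_eq_getElem _ _ (by omega) (by exact_mod_cast hk)]
  simp

theorem getD_map_snd (pairs : List (Int × Int)) (k : Nat) (hk : k < pairs.length) :
    PySem.List.pyGetD (pairs.map (fun p => p.2)) (k : Int) 0
      = (PySem.List.pyGetD pairs (k : Int) ((0 : Int), (0 : Int))).2 := by
  rw [PySem.List.pyGetD_eq_getElem _ _ (by omega) (by simpa using by exact_mod_cast hk),
    PySem.List.pyGetD_eq_getElem _ _ (by omega) (by exact_mod_cast hk)]
  simp

-- under the domain bound, bisecting A's sentinel-clamped value intervals gives B's index ranges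
theorem bis_iv_eq_rng (pairs : List (Int × Int)) (ws : List Int) (i : Nat) (hi : i < pairs.length)
    (hb : ∀ p ∈ pairs, (-2147483648 ≤ p.1 ∧ p.1 ≤ 2147483648) ∧ (-2147483648 ≤ p.2 ∧ p.2 ≤ 2147483648)) :
    pvBis ws (pvIvA (pairs.map (fun p => p.1)) (pairs.map (fun p => p.2)) (pairs.length : Int) i)
      = pvRngB pairs ws i := by
  have hpmem : PySem.List.pyGetD pairs (i : Int) ((0 : Int), (0 : Int)) ∈ pairs := by
    rw [PySem.List.pyGetD_eq_getElem _ _ (by omega) (by exact_mod_cast hi)]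
    exact List.getElem_mem _
  have hbi := hb _ hpmem
  simp only [pvIvA, pvRngB, pvBis]
  rw [getD_map_fst pairs i hi, getD_map_snd pairs i hi]
  by_cases h0 : 0 < i
  · rw [if_pos (show (0 : Int) < (i : Int) from by exact_mod_cast h0), if_pos h0,
      show ((i : Int) - 1) = ((i - 1 : Nat) : Int) from by omega,
      getD_map_fst pairs (i - 1) (by omega)]
    by_cases hn : (i : Int) < (pairs.length : Int) - 1
    · rw [if_pos hn, if_pos hn,
        show ((i : Int) + 1) = ((i + 1 : Nat) : Int) from by omega,
        getD_map_fst pairs (i + 1) (by omega)]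
    · rw [if_neg hn, if_neg hn,
        min_eq_left (by omega : (PySem.List.pyGetD pairs (i : Int) ((0 : Int), (0 : Int))).1 + (PySem.List.pyGetD pairs (i : Int) ((0 : Int), (0 : Int))).2 ≤ 10 ^ 18)]
  · rw [if_neg (show ¬ (0 : Int) < (i : Int) from by exact_mod_cast h0), if_neg h0,
      max_eq_left (by omega : -(10 ^ 18) ≤ (PySem.List.pyGetD pairs (i : Int) ((0 : Int), (0 : Int))).1 - (PySem.List.pyGetD pairs (i : Int) ((0 : Int), (0 : Int))).2)]
    by_cases hn : (i : Int) < (pairs.length : Int) - 1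
    · rw [if_pos hn, if_pos hn,
        show ((i : Int) + 1) = ((i + 1 : Nat) : Int) from by omega,
        getD_map_fst pairs (i + 1) (by omega)]
    · rw [if_neg hn, if_neg hn,
        min_eq_left (by omega : (PySem.List.pyGetD pairs (i : Int) ((0 : Int), (0 : Int))).1 + (PySem.List.pyGetD pairs (i : Int) ((0 : Int), (0 : Int))).2 ≤ 10 ^ 18)]

-- ===== VERDICT (by name: the statement is the Claim_ definition above) =====
theorem maxWalls_spec : Claim_equal_maxWalls := by
  intro robots distance walls hdom
  simp only [Spec_maxWalls, maxWalls, maxWalls_alt]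
  have hb : ∀ p ∈ PySem.List.sorted2 (List.zip robots distance) (fun p => p.1) (fun p => p.2),
      (-2147483648 ≤ p.1 ∧ p.1 ≤ 2147483648) ∧ (-2147483648 ≤ p.2 ∧ p.2 ≤ 2147483648) := by
    intro p hp
    have hz : p ∈ List.zip robots distance :=
      (PySem.List.sorted2_perm _ _ _ _).mem_iff.mp hp
    obtain ⟨h1, h2⟩ := List.of_mem_zip (a := p.1) (b := p.2) (by simpa using hz)
    unfold Dom_maxWalls at hdom
    simp only [List.all_eq_true, pvDomInt, decide_eq_true_eq, Bool.and_eq_true] at hdom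
    exact ⟨hdom.1.1 _ h1, hdom.1.2 _ h2⟩
  have hr : ((List.range (PySem.List.sorted2 (List.zip robots distance) (fun p => p.1) (fun p => p.2)).length).map
        (pvRngB (PySem.List.sorted2 (List.zip robots distance) (fun p => p.1) (fun p => p.2))
          (PySem.List.sorted walls (fun x => x))))
      = ((List.range ((PySem.List.sorted2 (List.zip robots distance) (fun p => p.1) (fun p => p.2)).map (fun p => p.1)).length).map
          (pvIvA ((PySem.List.sorted2 (List.zip robots distance) (fun p => p.1) (fun p => p.2)).map (fun p => p.1))
            ((PySem.List.sorted2 (List.zip robots distance) (fun p => p.1) (fun p => p.2)).map (fun p => p.2))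
            (((PySem.List.sorted2 (List.zip robots distance) (fun p => p.1) (fun p => p.2)).map (fun p => p.1)).length : Int))).map
          (pvBis (PySem.List.sorted walls (fun x => x))) := by
    rw [List.map_map, List.length_map]
    exact (List.map_congr_left (fun i hi =>
      bis_iv_eq_rng _ _ i (List.mem_range.mp hi) hb)).symm
  rw [hr]
  exact final_eq _ _
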